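-- pv_equiv track=rewrite | github.com/Dnevvs/Algorithms_Python_developer | Recursion and sorting/P_part_sort.py | part_sort
-- ===== SOURCE A (Python) =====
-- from typing import List, Tuple
--
-- def part_sort(n_len: int, nums: List[int]) -> int:
--     n = 0
--     v = 0
--     j = 0
--     i = 0
--     while i < n_len:
--         v += nums[i]
--         j += i
--         if v == j:
--             n += 1
--             v = 0
--             j = 0
--         i += 1
--     return n
-- ===== SOURCE B (Python) =====
-- def part_sort(n_len, nums):
--     # Brute force per prefix: index i counts iff the whole prefix sum nums[0..i]
--     # equals the triangular number i*(i+1)//2.  No running state at all.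
--     return sum(1 for i in range(n_len) if sum(nums[: i + 1]) == i * (i + 1) // 2)
-- ===== Notes on version B (the rewrite author's own statement) =====
-- stated objective: alternative
-- what changed: A streams two resettable accumulators (running value and running index-sum); B keeps no state between iterations and instead, for each index i, recomputes the whole prefix sum via the slice nums[:i+1] and compares it with the closed-form triangular number i*(i+1)//2 (correct because A's resets subtract equal amounts from both accumulators, so each test is about the full prefix), trading A's O(n) time for a stateless O(n^2) brute force.
import Mathlib
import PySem

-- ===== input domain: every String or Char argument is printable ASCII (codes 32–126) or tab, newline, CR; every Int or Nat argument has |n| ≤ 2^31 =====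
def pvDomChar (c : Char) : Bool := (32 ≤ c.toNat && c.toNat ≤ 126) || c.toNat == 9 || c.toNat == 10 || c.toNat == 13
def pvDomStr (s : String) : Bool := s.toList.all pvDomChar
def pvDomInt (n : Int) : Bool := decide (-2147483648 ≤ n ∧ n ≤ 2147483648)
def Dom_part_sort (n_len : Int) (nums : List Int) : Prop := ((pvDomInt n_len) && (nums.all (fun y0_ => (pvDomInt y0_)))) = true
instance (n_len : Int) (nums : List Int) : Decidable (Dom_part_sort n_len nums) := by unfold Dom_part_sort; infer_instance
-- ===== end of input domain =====

-- B replaces A's streamed, resettable accumulator pair by a stateless per-index brute force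
-- that recomputes each whole prefix sum from a slice; objective: alternative (B trades O(n) for O(n^2)).

-- ===== PORT A =====
-- while-loop over i = 0 .. n_len-1 transliterated as a fold over the same index range;
-- state (n, v, j) exactly as in A.
def part_sort (n_len : Int) (nums : List Int) : Int :=
  ((PySem.List.pyRange 0 n_len 1).foldl
    (fun (st : Int × Int × Int) i =>
      let v := st.2.1 + PySem.List.pyGetD nums i 0
      let j := st.2.2 + i
      if v = j then (st.1 + 1, 0, 0) else (st.1, v, j))
    (0, 0, 0)).1

-- ===== PORT B =====
-- sum of the 0/1 generator: fold over range(n_len), testing sum(nums[:i+1]) == i*(i+1)//2.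
def part_sort_alt (n_len : Int) (nums : List Int) : Int :=
  (PySem.List.pyRange 0 n_len 1).foldl
    (fun (acc : Int) i =>
      if (PySem.List.slice nums none (some (i + 1))).sum = PySem.Int.floordiv (i * (i + 1)) 2
      then acc + 1 else acc)
    0

-- ===== PRECONDITION & SPEC =====
-- A raises IndexError on nums[i] when n_len exceeds len(nums); exactly those inputs are excluded.
def Pre_part_sort (n_len : Int) (nums : List Int) : Prop := n_len ≤ (nums.length : Int)
instance (n_len : Int) (nums : List Int) : Decidable (Pre_part_sort n_len nums) := by unfold Pre_part_sort; infer_instance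
def pvWitness_part_sort : Int × List Int := (3, [0, 1, 2])

def Spec_part_sort (n_len : Int) (nums : List Int) (out : Int) : Prop := out = part_sort_alt n_len nums
instance (n_len : Int) (nums : List Int) (out : Int) : Decidable (Spec_part_sort n_len nums out) := by unfold Spec_part_sort; infer_instance

-- ===== CLAIM (what is proved, stated in full; the proofs are below) =====
def Claim_equal_part_sort : Prop := ∀ (n_len : Int) (nums : List Int), Dom_part_sort n_len nums → Pre_part_sort n_len nums → Spec_part_sort n_len nums (part_sort n_len nums)

-- ===== LEMMAS AND PROOFS =====

-- k*(k+1) steps up from k*(k-1) by 2*k, so the floored halves differ by exactly k.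
lemma pv_tri_step (k : Int) :
    PySem.Int.floordiv (k * (k + 1)) 2 = PySem.Int.floordiv (k * (k - 1)) 2 + k := by
  rw [PySem.Int.floordiv_eq_ediv_of_pos (by norm_num : (0:Int) < 2),
      PySem.Int.floordiv_eq_ediv_of_pos (by norm_num : (0:Int) < 2)]
  have h : k * (k + 1) = k * (k - 1) + k * 2 := by ring
  rw [h, Int.add_mul_ediv_right _ _ (by norm_num)]

-- B's slice nums[:k+1] is the (k+1)-prefix, and its sum extends the k-prefix sum
-- by the element A reads at index k.
lemma pv_take_step (nums : List Int) (k : Int) (hk : 0 ≤ k) (hlt : k < (nums.length : Int)) :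
    (PySem.List.slice nums none (some (k + 1))).sum
      = (nums.take k.toNat).sum + PySem.List.pyGetD nums k 0 := by
  rw [PySem.List.slice_to nums (by omega)]
  have ht : (k + 1).toNat = k.toNat + 1 := by omega
  have hlen : k.toNat < nums.length := by omega
  have hkc : k = ((k.toNat : Nat) : Int) := by omega
  rw [ht, hkc, PySem.List.pyGetD_natCast]
  simp only [Int.toNat_natCast]
  rw [List.sum_take_succ _ _ hlen]
  simp [List.getD, List.getElem?_eq_getElem hlen]

-- Loop invariant: A's state (v, j) satisfies S(k) - v = T(k) - j where S(k) is the
-- k-prefix sum and T(k) = k*(k-1)//2; under it A's fold equals B's stateless fold.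
lemma pv_loop (nums : List Int) (b : Int) (hb : b ≤ (nums.length : Int)) :
    ∀ (m : Nat) (k n v j : Int), 0 ≤ k → (b - k).toNat = m →
      (nums.take k.toNat).sum - v = PySem.Int.floordiv (k * (k - 1)) 2 - j →
      ((PySem.List.pyRange k b 1).foldl
        (fun (st : Int × Int × Int) i =>
          let v := st.2.1 + PySem.List.pyGetD nums i 0
          let j := st.2.2 + i
          if v = j then (st.1 + 1, 0, 0) else (st.1, v, j)) (n, v, j)).1 =
      (PySem.List.pyRange k b 1).foldl
        (fun (acc : Int) i =>
          if (PySem.List.slice nums none (some (i + 1))).sum = PySem.Int.floordiv (i * (i + 1)) 2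
          then acc + 1 else acc) n := by
  intro m
  induction m with
  | zero =>
    intro k n v j _ hm _
    rw [PySem.List.pyRange_one_eq_nil (by omega)]
    simp only [List.foldl_nil]
  | succ m ih =>
    intro k n v j hk hm hinv
    rw [PySem.List.pyRange_one_cons (by omega)]
    simp only [List.foldl_cons]
    have hkb : k < b := by omega
    have hstep := pv_take_step nums k hk (by omega)
    have htri := pv_tri_step k
    set a := PySem.List.pyGetD nums k 0 with ha
    set S := (nums.take k.toNat).sum with hS
    have hnext : (k + 1) * (k + 1 - 1) = k * (k + 1) := by ring
    have hS' : (nums.take (k + 1).toNat).sum = S + a := by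
      have := pv_take_step nums k hk (by omega)
      rw [PySem.List.slice_to nums (by omega)] at this
      exact this
    by_cases hc : v + a = j + k
    · have hc' : (PySem.List.slice nums none (some (k + 1))).sum
          = PySem.Int.floordiv (k * (k + 1)) 2 := by omega
      rw [if_pos hc, if_pos hc']
      exact ih (k + 1) (n + 1) 0 0 (by omega) (by omega) (by rw [hS', hnext]; omega)
    · have hc' : ¬ (PySem.List.slice nums none (some (k + 1))).sum
          = PySem.Int.floordiv (k * (k + 1)) 2 := by omega
      rw [if_neg hc, if_neg hc']
      exact ih (k + 1) n (v + a) (j + k) (by omega) (by omega) (by rw [hS', hnext]; omega)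

-- ===== VERDICT (by name: the statement is the Claim_ definition above) =====
theorem part_sort_spec : Claim_equal_part_sort := by
  intro n_len nums _ hpre
  unfold Spec_part_sort part_sort part_sort_alt
  exact pv_loop nums n_len hpre (n_len - 0).toNat 0 0 0 0 (by omega) rfl (by simp [PySem.Int.floordiv])
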